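-- pv_equiv track=rewrite | github.com/TessFerrandez/algorithms | dynamic programming/lc-m-1567-maximum-length-of-subarray-with-positive-product.py | getMaxLen1
-- ===== SOURCE A (Python) =====
-- from typing import List
--
-- def getMaxLen1(nums: List[int]) -> int:
--     n = len(nums)
--
--     pos, neg = [0] * n, [0] * n
--
--     if nums[0] > 0:
--         pos[0] = 1
--     if nums[0] < 0:
--         neg[0] = 1
--
--     ans = pos[0]
--
--     for i in range(1, n):
--         if nums[i] > 0:
--             pos[i] = 1 + pos[i - 1]
--             neg[i] = 1 + neg[i - 1] if neg[i - 1] > 0 else 0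
--         elif nums[i] < 0:
--             pos[i] = 1 + neg[i - 1] if neg[i - 1] > 0 else 0
--             neg[i] = 1 + pos[i - 1]
--         ans = max(ans, pos[i])
--
--     return ans
-- ===== SOURCE B (Python) =====
-- from typing import List
--
-- def getMaxLen1(nums: List[int]) -> int:
--     # Segment scan: track start of current zero-free segment, parity of
--     # negatives, and the first/last negative index in the segment.
--     best = 0
--     seg_start = 0
--     neg_count = 0
--     first_neg = -1
--     last_neg = -1
--     for i, x in enumerate(nums):
--         if x == 0:
--             seg_start = i + 1
--             neg_count = 0
--             first_neg = -1
--             last_neg = -1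
--         else:
--             if x < 0:
--                 neg_count += 1
--                 if first_neg < 0:
--                     first_neg = i
--                 last_neg = i
--             if neg_count % 2 == 0:
--                 cand = i + 1 - seg_start
--             else:
--                 cand = max(i - first_neg, last_neg - seg_start)
--             best = max(best, cand)
--     return best
-- ===== Notes on version B (the rewrite author's own statement) =====
-- stated objective: alternative
-- what changed: Replaces the two per-index DP arrays pos/neg by a single-pass segment scan that only tracks the current zero-free segment's start, negative-count parity and first/last negative index, computing each segment's best length arithmetically.
import Mathlib
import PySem

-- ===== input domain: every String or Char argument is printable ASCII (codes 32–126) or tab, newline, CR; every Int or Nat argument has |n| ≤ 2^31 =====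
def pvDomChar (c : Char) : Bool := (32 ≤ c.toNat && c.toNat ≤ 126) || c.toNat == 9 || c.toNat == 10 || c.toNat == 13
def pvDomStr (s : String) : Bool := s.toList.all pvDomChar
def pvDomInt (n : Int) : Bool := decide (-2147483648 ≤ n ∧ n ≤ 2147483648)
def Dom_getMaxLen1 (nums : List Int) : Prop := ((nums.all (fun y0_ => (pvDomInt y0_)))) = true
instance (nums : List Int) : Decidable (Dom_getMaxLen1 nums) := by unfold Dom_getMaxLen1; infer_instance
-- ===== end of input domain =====

-- B replaces the per-index pos/neg DP arrays by a single segment scan (start of the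
-- current zero-free segment, negative parity, first/last negative index); objective: alternative.


-- ===== PORT A =====
-- loop body of A's 'for i in range(1, n)' (state: pos array, neg array, ans)
def aStep (nums : List Int) (st : List Int × List Int × Int) (i : Int) : List Int × List Int × Int :=
  let pos := st.1; let neg := st.2.1; let ans := st.2.2
  let x := PySem.List.pyGetD nums i 0
  if 0 < x then
    let pos := PySem.List.pySetD pos i (1 + PySem.List.pyGetD pos (i-1) 0)
    let neg := PySem.List.pySetD neg i
      (if 0 < PySem.List.pyGetD neg (i-1) 0 then 1 + PySem.List.pyGetD neg (i-1) 0 else 0)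
    (pos, neg, max ans (PySem.List.pyGetD pos i 0))
  else if x < 0 then
    let pos' := PySem.List.pySetD pos i
      (if 0 < PySem.List.pyGetD neg (i-1) 0 then 1 + PySem.List.pyGetD neg (i-1) 0 else 0)
    let neg := PySem.List.pySetD neg i (1 + PySem.List.pyGetD pos (i-1) 0)
    (pos', neg, max ans (PySem.List.pyGetD pos' i 0))
  else
    (pos, neg, max ans (PySem.List.pyGetD pos i 0))

def getMaxLen1 (nums : List Int) : Int :=
  let n : Int := (nums.length : Int)
  let pos : List Int := List.replicate nums.length 0
  let neg : List Int := List.replicate nums.length 0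
  match PySem.List.pyGet? nums 0 with
  | none => 0   -- Python raises IndexError here (empty list); excluded by Pre_
  | some x0 =>
    let pos := if 0 < x0 then PySem.List.pySetD pos 0 1 else pos
    let neg := if x0 < 0 then PySem.List.pySetD neg 0 1 else neg
    let ans := PySem.List.pyGetD pos 0 0
    ((PySem.List.pyRange 1 n 1).foldl (aStep nums) (pos, neg, ans)).2.2

-- ===== PORT B =====
-- loop body of B's 'for i, x in enumerate(nums)' (state: best, seg_start, neg_count, first_neg, last_neg)
def bStep (st : Int × Int × Int × Int × Int) (p : Int × Int) : Int × Int × Int × Int × Int :=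
  let best := st.1; let s := st.2.1; let c := st.2.2.1; let f := st.2.2.2.1; let l := st.2.2.2.2
  let i := p.1; let x := p.2
  if x = 0 then (best, i + 1, 0, -1, -1)
  else
    let c := if x < 0 then c + 1 else c
    let f := if x < 0 then (if f < 0 then i else f) else f
    let l := if x < 0 then i else l
    let cand := if PySem.Int.mod c 2 = 0 then i + 1 - s else max (i - f) (l - s)
    (max best cand, s, c, f, l)

def getMaxLen1_alt (nums : List Int) : Int :=
  ((PySem.List.enumerate nums 0).foldl bStep (0, 0, 0, -1, -1)).1

-- ===== PRECONDITION & SPEC =====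
-- Pre_ excludes only the empty list, on which Python's nums[0] raises IndexError.
def Pre_getMaxLen1 (nums : List Int) : Prop := nums ≠ []
instance (nums : List Int) : Decidable (Pre_getMaxLen1 nums) := by unfold Pre_getMaxLen1; infer_instance
def pvWitness_getMaxLen1 : List Int := [1, -2, 0, -3, 4]

def Spec_getMaxLen1 (nums : List Int) (out : Int) : Prop := out = getMaxLen1_alt nums
instance (nums : List Int) (out : Int) : Decidable (Spec_getMaxLen1 nums out) := by unfold Spec_getMaxLen1; infer_instance

-- ===== CLAIM (what is proved, stated in full; the proofs are below) =====
def Claim_equal_getMaxLen1 : Prop := ∀ (nums : List Int), Dom_getMaxLen1 nums → Pre_getMaxLen1 nums → Spec_getMaxLen1 nums (getMaxLen1 nums)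

-- ===== LEMMAS AND PROOFS =====

-- Scalar characterisation of A's DP arrays: Pv/Nv are pos[k]/neg[k], AnsV the running max.
mutual
def Pv (nums : List Int) : Nat → Int
  | 0 => if 0 < nums.getD 0 0 then 1 else 0
  | k+1 =>
    let x := nums.getD (k+1) 0
    if 0 < x then 1 + Pv nums k
    else if x < 0 then (if 0 < Nv nums k then 1 + Nv nums k else 0)
    else 0
def Nv (nums : List Int) : Nat → Int
  | 0 => if nums.getD 0 0 < 0 then 1 else 0
  | k+1 =>
    let x := nums.getD (k+1) 0
    if 0 < x then (if 0 < Nv nums k then 1 + Nv nums k else 0)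
    else if x < 0 then 1 + Pv nums k
    else 0
end

def AnsV (nums : List Int) : Nat → Int
  | 0 => Pv nums 0
  | k+1 => max (AnsV nums k) (Pv nums (k+1))

def aRun (nums : List Int) (k : Nat) : List Int × List Int × Int :=
  let pos : List Int := List.replicate nums.length 0
  let neg : List Int := List.replicate nums.length 0
  let x0 := nums.getD 0 0
  let pos := if 0 < x0 then PySem.List.pySetD pos 0 1 else pos
  let neg := if x0 < 0 then PySem.List.pySetD neg 0 1 else neg
  let ans := PySem.List.pyGetD pos 0 0
  (PySem.List.pyRange 1 ((k : Int) + 1) 1).foldl (aStep nums) (pos, neg, ans)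

theorem pyGetD_int_natCast (xs : List Int) (k : Nat) :
    PySem.List.pyGetD xs (k : Int) 0 = xs.getD k 0 := PySem.List.pyGetD_natCast xs k 0

theorem pyGetD_int_succ (xs : List Int) (k : Nat) :
    PySem.List.pyGetD xs ((k : Int) + 1) 0 = xs.getD (k+1) 0 := by
  rw [show ((k:Int)+1) = ((k+1:Nat):Int) from by push_cast; ring, PySem.List.pyGetD_natCast]

theorem pySetD_int_succ (xs : List Int) (k : Nat) (v : Int) :
    PySem.List.pySetD xs ((k : Int) + 1) v = xs.set (k+1) v := by
  rw [show ((k:Int)+1) = ((k+1:Nat):Int) from by push_cast; ring, PySem.List.pySetD_natCast]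

theorem aInv (nums : List Int) (k : Nat) (hk : k < nums.length) :
    (aRun nums k).1.length = nums.length ∧ (aRun nums k).2.1.length = nums.length ∧
    (aRun nums k).1.getD k 0 = Pv nums k ∧ (aRun nums k).2.1.getD k 0 = Nv nums k ∧
    (aRun nums k).2.2 = AnsV nums k ∧
    (∀ j, k < j → (aRun nums k).1.getD j 0 = 0) ∧ (∀ j, k < j → (aRun nums k).2.1.getD j 0 = 0) := by
  induction k with
  | zero =>
    have h0 : 0 < nums.length := hk
    unfold aRun
    rw [show ((0:Nat):Int)+1 = (1:Int) from by norm_num, PySem.List.pyRange_one_eq_nil le_rfl]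
    have hset : ∀ (xs : List Int) (v : Int), PySem.List.pySetD xs 0 v = xs.set 0 v := by
      intro xs v; rw [PySem.List.pySetD_of_nonneg xs v (by norm_num)]; rfl
    simp only [List.foldl_nil, Pv, Nv, AnsV, hset, PySem.List.pyGetD_zero]
    generalize nums.getD 0 0 = x0
    refine ⟨?_, ?_, ?_, ?_, ?_, ?_, ?_⟩ <;>
      first
      | (intro j hj
         by_cases hp : 0 < x0 <;> by_cases hn : x0 < 0 <;>
          simp [hp, hn, List.getD_eq_getElem?_getD, List.getElem?_set, List.getElem?_replicate,
            Nat.ne_of_lt hj] <;> (split <;> simp))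
      | (by_cases hp : 0 < x0 <;> by_cases hn : x0 < 0 <;>
          simp [hp, hn, List.getD_eq_getElem?_getD, List.getElem?_set, h0])
  | succ k ih =>
    have hk' : k < nums.length := by omega
    obtain ⟨hl1, hl2, hP, hN, hA, hZ1, hZ2⟩ := ih hk'
    have hsplit : PySem.List.pyRange 1 (((k+1:Nat):Int)+1) 1
        = PySem.List.pyRange 1 ((k:Int)+1) 1 ++ [((k:Int)+1)] := by
      have h1 : (1:Int) ≤ (k:Int) + 1 := by omega
      have := PySem.List.pyRange_one_succ_right (a := 1) (b := (k:Int)+1) h1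
      rw [show (((k+1:Nat):Int)+1) = ((k:Int)+1)+1 from by push_cast; ring, this]
    unfold aRun at hl1 hl2 hP hN hA hZ1 hZ2 ⊢
    rw [hsplit, List.foldl_append, List.foldl_cons, List.foldl_nil]
    generalize hst : List.foldl (aStep nums) _ _ = st at hl1 hl2 hP hN hA hZ1 hZ2 ⊢
    obtain ⟨pos, neg, ans⟩ := st
    simp only at hl1 hl2 hP hN hA hZ1 hZ2
    unfold aStep
    simp only [show ((k:Int)+1-1) = (k:Int) from by ring, pyGetD_int_succ, pyGetD_int_natCast,
      pySetD_int_succ, hP, hN, hA]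
    have hkl1 : k + 1 < pos.length := by omega
    have hkl2 : k + 1 < neg.length := by omega
    simp only [Pv, Nv, AnsV]
    generalize nums.getD (k+1) 0 = x
    by_cases hp : 0 < x <;> by_cases hn : x < 0
    · omega
    · refine ⟨?_, ?_, ?_, ?_, ?_, ?_, ?_⟩ <;>
        first
        | (intro j hj
           have h1 := hZ1 j (by omega); have h2 := hZ2 j (by omega)
           simp [List.getD_eq_getElem?_getD] at h1 h2
           simp [List.getD_eq_getElem?_getD, List.getElem?_set, Nat.ne_of_lt hj, hp, hn, h1, h2])
        | simp [hp, hn, List.getD_eq_getElem?_getD, List.getElem?_set, hkl1, hkl2, hl1, hl2, hk]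
    · refine ⟨?_, ?_, ?_, ?_, ?_, ?_, ?_⟩ <;>
        first
        | (intro j hj
           have h1 := hZ1 j (by omega); have h2 := hZ2 j (by omega)
           simp [List.getD_eq_getElem?_getD] at h1 h2
           simp [List.getD_eq_getElem?_getD, List.getElem?_set, Nat.ne_of_lt hj, hp, hn, h1, h2])
        | simp [hp, hn, List.getD_eq_getElem?_getD, List.getElem?_set, hkl1, hkl2, hl1, hl2, hk]
    · have e1 : pos.getD (k+1) 0 = 0 := hZ1 (k+1) (by omega)
      have e2 : neg.getD (k+1) 0 = 0 := hZ2 (k+1) (by omega)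
      simp [List.getD_eq_getElem?_getD] at e1 e2
      refine ⟨?_, ?_, ?_, ?_, ?_, ?_, ?_⟩ <;>
        first
        | (intro j hj
           have h1 := hZ1 j (by omega); have h2 := hZ2 j (by omega)
           simp [List.getD_eq_getElem?_getD] at h1 h2
           simp [hp, hn, h1, h2])
        | simp [hp, hn, hl1, hl2, e1, e2, hA]

theorem A_char (nums : List Int) (h : nums ≠ []) :
    getMaxLen1 nums = AnsV nums (nums.length - 1) := by
  have hget : PySem.List.pyGet? nums 0 = some (nums.getD 0 0) := by
    cases nums with
    | nil => exact absurd rfl h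
    | cons a l => simp [List.getD]
  have hc : (((nums.length - 1 : Nat) : Int) + 1) = (nums.length : Int) := by
    have : 1 ≤ nums.length := by cases nums; exact absurd rfl h; simp
    omega
  have := (aInv nums (nums.length - 1) (by cases nums; exact absurd rfl h; simp)).2.2.2.2.1
  unfold getMaxLen1
  rw [hget]
  unfold aRun at this
  rw [hc] at this
  exact this

def bRun (nums : List Int) (k : Nat) : Int × Int × Int × Int × Int :=
  ((PySem.List.enumerate nums 0).take (k+1)).foldl bStep (0, 0, 0, -1, -1)

theorem bInv (nums : List Int) (k : Nat) (hk : k < nums.length) :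
    (bRun nums k).1 = AnsV nums k ∧
    (Pv nums k = if (bRun nums k).2.2.1 % 2 = 0 then (k : Int) + 1 - (bRun nums k).2.1 else (k : Int) - (bRun nums k).2.2.2.1) ∧
    (Nv nums k = if (bRun nums k).2.2.1 % 2 = 0 then (if 0 ≤ (bRun nums k).2.2.2.1 then (k : Int) - (bRun nums k).2.2.2.1 else 0) else (k : Int) + 1 - (bRun nums k).2.1) ∧
    0 ≤ (bRun nums k).2.1 ∧ (bRun nums k).2.1 ≤ (k : Int) + 1 ∧
    0 ≤ (bRun nums k).2.2.1 ∧
    (((bRun nums k).2.2.2.1 = -1 ∧ (bRun nums k).2.2.2.2 = -1 ∧ (bRun nums k).2.2.1 % 2 = 0) ∨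
      (0 ≤ (bRun nums k).2.2.2.1 ∧ (bRun nums k).2.1 ≤ (bRun nums k).2.2.2.1 ∧
       (bRun nums k).2.2.2.1 ≤ (bRun nums k).2.2.2.2 ∧ (bRun nums k).2.2.2.2 ≤ (k : Int) ∧
       ((bRun nums k).2.2.1 % 2 = 0 → (bRun nums k).2.2.2.1 < (bRun nums k).2.2.2.2))) ∧
    ((bRun nums k).2.2.1 % 2 ≠ 0 → (bRun nums k).2.2.2.2 - (bRun nums k).2.1 ≤ (bRun nums k).1) ∧
    Pv nums k ≤ (bRun nums k).1 ∧ 0 ≤ (bRun nums k).1 := by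
  have hmod : ∀ c : Int, PySem.Int.mod c 2 = c % 2 := by
    intro c; rw [PySem.Int.mod_eq_emod_of_pos]; norm_num
  induction k with
  | zero =>
    obtain ⟨a, l, rfl⟩ : ∃ a l, nums = a :: l := by
      cases nums; simp at hk; exact ⟨_, _, rfl⟩
    unfold bRun
    rw [PySem.List.enumerate_cons]
    simp only [List.take_succ_cons, List.take_zero, List.foldl_cons, List.foldl_nil,
      bStep, hmod, Pv, Nv, AnsV]
    simp only [List.getD_cons_zero]
    by_cases h0 : a = 0
    · have h1 : ¬ 0 < a := by omega
      have h2 : ¬ a < 0 := by omega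
      simp only [if_pos h0, if_neg h1, if_neg h2]
      refine ⟨?_, ?_, ?_, ?_, ?_, ?_, ?_, ?_, ?_, ?_⟩ <;> (try split_ifs) <;> first | omega | trivial | simp
    · by_cases hn : a < 0
      · have h1 : ¬ 0 < a := by omega
        simp only [if_neg h0, if_pos hn, if_neg h1]
        refine ⟨?_, ?_, ?_, ?_, ?_, ?_, ?_, ?_, ?_, ?_⟩ <;> (try split_ifs) <;> first | omega | trivial | simp
      · have h1 : 0 < a := by omega
        simp only [if_neg h0, if_neg hn, if_pos h1]
        refine ⟨?_, ?_, ?_, ?_, ?_, ?_, ?_, ?_, ?_, ?_⟩ <;> (try split_ifs) <;> first | omega | trivial | simp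
  | succ k ih =>
    have hk' : k < nums.length := by omega
    have hkk : k + 1 < nums.length := hk
    obtain ⟨hA, hP, hN, hs0, hs1, hc0, hdisj, hbl, hbP, hb0⟩ := ih hk'
    have hxg : nums.getD (k+1) 0 = nums[k+1] := by
      rw [List.getD_eq_getElem?_getD, List.getElem?_eq_getElem hkk]; rfl
    have hstep : bRun nums (k+1) = bStep (bRun nums k) ((((k+1:Nat)):Int), nums[k+1]) := by
      unfold bRun
      rw [show k+1+1 = (k+1)+1 from rfl, List.take_succ, PySem.List.getElem?_enumerate,
        List.getElem?_eq_getElem hkk]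
      simp [List.foldl_append]
    rw [hstep]
    generalize hg : bRun nums k = st at hA hP hN hs0 hs1 hc0 hdisj hbl hbP hb0
    obtain ⟨best, s, c, f, l⟩ := st
    simp only at hA hP hN hs0 hs1 hc0 hdisj hbl hbP hb0
    simp only [bStep, hmod, Pv, Nv, AnsV, hxg]
    generalize nums[k+1] = x at *
    rw [hP, hN, ← hA]
    push_cast
    by_cases hx0 : x = 0
    · have h1 : ¬ 0 < x := by omega
      have h2 : ¬ x < 0 := by omega
      simp only [if_pos hx0, if_neg h1, if_neg h2]
      refine ⟨?_, ?_, ?_, ?_, ?_, ?_, ?_, ?_, ?_, ?_⟩ <;> (try split_ifs) <;> first | omega | trivial | simp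
    · by_cases hxn : x < 0
      · have h1 : ¬ 0 < x := by omega
        simp only [if_neg hx0, if_pos hxn, if_neg h1]
        refine ⟨?_, ?_, ?_, ?_, ?_, ?_, ?_, ?_, ?_, ?_⟩ <;> (try split_ifs) <;> first | omega | trivial | simp
      · have h1 : 0 < x := by omega
        simp only [if_neg hx0, if_neg hxn, if_pos h1]
        refine ⟨?_, ?_, ?_, ?_, ?_, ?_, ?_, ?_, ?_, ?_⟩ <;> (try split_ifs) <;> first | omega | trivial | simp

theorem B_char (nums : List Int) (_h : nums ≠ []) :
    getMaxLen1_alt nums = (bRun nums (nums.length - 1)).1 := by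
  unfold getMaxLen1_alt bRun
  rw [List.take_of_length_le]
  rw [PySem.List.length_enumerate]
  omega

-- ===== VERDICT (by name: the statement is the Claim_ definition above) =====
theorem getMaxLen1_spec : Claim_equal_getMaxLen1 := by
  intro nums _ hpre
  unfold Spec_getMaxLen1
  have hk : nums.length - 1 < nums.length := by
    cases nums with | nil => exact absurd rfl hpre | cons a l => simp
  rw [A_char nums hpre, B_char nums hpre, (bInv nums (nums.length - 1) hk).1]
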